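-- pv_equiv track=rewrite | github.com/joaovantol/CodingExercises | python/maxEarnings.py | max_earnings
-- ===== SOURCE A (Python) =====
-- def max_earnings(earnings, k):
--     n = len(earnings)
--     if n == 0:
--         return 0
--
--     dp = [0] * n
--
--     for i in range(n):
--         # Option 1: skip today, so dp[i] = dp[i - 1]
--         max_val = dp[i - 1] if i > 0 else 0
--         total = 0
--
--         # Option 2: work for d days ending today (d from 1 to k)
--         for d in range(1, k + 1):
--             if i - d + 1 < 0:
--                 break
--             total += earnings[i - d + 1]
--             prev = dp[i - d - 1] if i - d - 1 >= 0 else 0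
--             max_val = max(max_val, total + prev)
--
--         dp[i] = max_val
--
--     return dp[-1]
-- ===== SOURCE B (Python) =====
-- def max_earnings(earnings, k):
--     # O(n) rewrite: prefix sums + amortized-O(1) sliding-window maximum
--     # (max-queue built from two stacks with cached maxima) over the dp
--     # candidates val[m] = dp[m-2] - P[m].
--     n = len(earnings)
--     if n == 0 or k <= 0:
--         return 0
--
--     P = [0] * (n + 1)
--     for i in range(n):
--         P[i + 1] = P[i] + earnings[i]
--
--     back = []   # stacks of (value, max of this and everything below)
--     front = []
--
--     def push(v):
--         m = v if not back else max(v, back[-1][1])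
--         back.append((v, m))
--
--     def pop_oldest():
--         if not front:
--             while back:
--                 v, _ = back.pop()
--                 m = v if not front else max(v, front[-1][1])
--                 front.append((v, m))
--         front.pop()
--
--     def queue_max():
--         if front and back:
--             return max(front[-1][1], back[-1][1])
--         if front:
--             return front[-1][1]
--         return back[-1][1]
--
--     prev, prev2 = 0, 0   # dp[i-1], dp[i-2]
--     for i in range(n):
--         push(prev2 - P[i])          # candidate val[i] = dp[i-2] - P[i]
--         if i - k >= 0:              # window of starts is [i-k+1 .. i]
--             pop_oldest()
--         cur = max(prev, P[i + 1] + queue_max())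
--         prev2, prev = prev, cur
--     return prev
-- ===== Notes on version B (the rewrite author's own statement) =====
-- stated objective: faster
-- what changed: Replaces A's O(n*k) inner scan over run lengths with prefix sums plus an amortized-O(1) sliding-window maximum (a max-queue made of two stacks with cached maxima) over the dp candidates dp[m-2]-P[m], giving an O(n) algorithm.
import Mathlib
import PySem

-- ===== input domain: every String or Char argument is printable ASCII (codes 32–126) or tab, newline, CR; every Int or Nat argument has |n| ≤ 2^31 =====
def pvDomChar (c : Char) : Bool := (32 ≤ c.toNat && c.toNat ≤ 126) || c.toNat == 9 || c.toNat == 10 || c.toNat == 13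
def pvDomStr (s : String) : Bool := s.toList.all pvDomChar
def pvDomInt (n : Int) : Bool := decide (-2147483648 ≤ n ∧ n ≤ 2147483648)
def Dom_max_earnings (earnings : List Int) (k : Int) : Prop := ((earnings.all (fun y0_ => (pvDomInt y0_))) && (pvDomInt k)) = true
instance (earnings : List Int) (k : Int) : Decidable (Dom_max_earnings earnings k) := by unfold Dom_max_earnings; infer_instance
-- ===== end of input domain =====

-- B replaces A's O(n·k) inner scan over run lengths by prefix sums and an
-- amortized-O(1) sliding-window maximum (a max-queue of two stacks with cached
-- maxima), an O(n) algorithm; objective: faster (asymptotic).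

-- ===== PORT A =====
-- inner 'for d in range(1, k+1)' loop with its break; the guarded indices
-- i-d+1 and i-d-1 are nonnegative exactly when read, so getD/toNat is exact.
-- inner 'for d in range(1, k+1)' loop with its break, as the counter loop it
-- is in Python (range is lazy); the guarded indices i-d+1 and i-d-1 are
-- nonnegative exactly when read, so getD/toNat is exact.
def innerA (E dp : List Int) (i : Nat) (kk d mv tot : Int) : Int × Int :=
  if _h : d < kk + 1 then
    if (i : Int) - d + 1 < 0 then (mv, tot)   -- break
    else
      let tot' := tot + E.getD ((i : Int) - d + 1).toNat 0
      let prev := if (i : Int) - d - 1 ≥ 0 then dp.getD ((i : Int) - d - 1).toNat 0 else 0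
      innerA E dp i kk (d + 1) (max mv (tot' + prev)) tot'
  else (mv, tot)
termination_by (kk + 1 - d).toNat
decreasing_by omega

def max_earnings (earnings : List Int) (k : Int) : Int :=
  let n := earnings.length
  if n = 0 then 0
  else
    let dp := (List.range n).foldl (fun dp i =>
      let mv := if 0 < i then dp.getD (i - 1) 0 else 0
      let r := innerA earnings dp i k 1 mv 0
      dp.set i r.1) (List.replicate n 0)
    PySem.List.pyGetD dp (-1) 0

-- ===== PORT B =====
-- stacks carry (value, cached max of this value and everything below)
def pvPush (s : List (Int × Int)) (v : Int) : List (Int × Int) :=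
  match s with
  | [] => [(v, v)]
  | (_, m) :: _ => (v, max v m) :: s

def pvFlush : List (Int × Int) → List (Int × Int) → List (Int × Int)
  | [], f => f
  | (v, _) :: rest, f => pvFlush rest (pvPush f v)

-- max of the queue; queried only when the queue is nonempty (0 unreachable)
def pvQMax (f b : List (Int × Int)) : Int :=
  match f, b with
  | (_, mf) :: _, (_, mb) :: _ => max mf mb
  | (_, mf) :: _, [] => mf
  | [], (_, mb) :: _ => mb
  | [], [] => 0

-- P[i+1] = P[i] + earnings[i] into a preallocated list (indices in range)
def pvPrefix (earnings : List Int) : List Int :=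
  (List.range earnings.length).foldl
    (fun P i => P.set (i + 1) (P.getD i 0 + earnings.getD i 0))
    (List.replicate (earnings.length + 1) 0)

-- one iteration of B's main loop: push val[i], drop the start that left the
-- window, then read the window max
def pvStep (P : List Int) (k : Int)
    (st : List (Int × Int) × List (Int × Int) × Int × Int) (i : Nat) :
    List (Int × Int) × List (Int × Int) × Int × Int :=
  let (b, f, prev, prev2) := st
  let b := pvPush b (prev2 - P.getD i 0)
  let (b, f) :=
    if (i : Int) - k ≥ 0 then
      let (b, f) := if f = [] then (([] : List (Int × Int)), pvFlush b f) else (b, f)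
      (b, f.tail)   -- pop_oldest
    else (b, f)
  let cur := max prev (P.getD (i + 1) 0 + pvQMax f b)
  (b, f, cur, prev)

def max_earnings_alt (earnings : List Int) (k : Int) : Int :=
  let n := earnings.length
  if n = 0 ∨ k ≤ 0 then 0
  else
    let P := pvPrefix earnings
    let st := (List.range n).foldl (pvStep P k) ([], [], 0, 0)
    st.2.2.1

-- ===== PRECONDITION & SPEC =====
def Spec_max_earnings (earnings : List Int) (k : Int) (out : Int) : Prop := out = max_earnings_alt earnings k
instance (earnings : List Int) (k : Int) (out : Int) : Decidable (Spec_max_earnings earnings k out) := by unfold Spec_max_earnings; infer_instance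

-- ===== CLAIM (what is proved, stated in full; the proofs are below) =====
def Claim_equal_max_earnings : Prop := ∀ (earnings : List Int) (k : Int), Dom_max_earnings earnings k → Spec_max_earnings earnings k (max_earnings earnings k)

-- ===== LEMMAS AND PROOFS =====

-- the common mathematical description of the dp both programs compute
def ePr (E : List Int) : Nat → Int
  | 0 => 0
  | j + 1 => ePr E j + E.getD j 0

-- max of a nonempty list ([] never reached where used)
def wm : List Int → Int
  | [] => 0
  | h :: t => t.foldl max h

-- Dlist E k' i = [dp[-1], dp[0], …, dp[i-1]] of the ideal dp recurrence
def Dlist (E : List Int) (k' : Nat) : Nat → List Int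
  | 0 => [0]
  | i + 1 =>
    let l := Dlist E k' i
    let win := List.range' (i + 1 - k') (min k' (i + 1))
    l ++ [max (l.getD i 0)
      (ePr E (i + 1) + wm (win.map (fun m => l.getD (m - 1) 0 - ePr E m)))]

def Dv (E : List Int) (k' : Nat) (i : Nat) : Int := (Dlist E k' i).getD i 0

def vl (E : List Int) (k' : Nat) (m : Nat) : Int := Dv E k' (m - 1) - ePr E m

def winvals (E : List Int) (k' : Nat) (i : Nat) : List Int :=
  (List.range' (i + 1 - k') (min k' (i + 1))).map (vl E k')

theorem length_Dlist (E : List Int) (k' : Nat) (i : Nat) : (Dlist E k' i).length = i + 1 := by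
  induction i with
  | zero => rfl
  | succ i ih => simp [Dlist, ih]

theorem getD_Dlist (E : List Int) (k' : Nat) :
    ∀ i m, m ≤ i → (Dlist E k' i).getD m 0 = Dv E k' m := by
  intro i
  induction i with
  | zero => intro m hm; interval_cases m; rfl
  | succ i ih =>
    intro m hm
    rcases Nat.lt_or_ge m (i + 1) with h | h
    · have hlen : m < (Dlist E k' i).length := by rw [length_Dlist]; omega
      rw [show Dlist E k' (i+1) = Dlist E k' i ++ [_] from rfl,
        List.getD_append _ _ _ _ hlen]
      exact ih m (by omega)
    · have hm' : m = i + 1 := by omega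
      subst hm'; rfl

theorem Dv_succ (E : List Int) (k' : Nat) (i : Nat) :
    Dv E k' (i + 1) = max (Dv E k' i) (ePr E (i + 1) + wm (winvals E k' i)) := by
  conv_lhs => rw [Dv, show Dlist E k' (i+1) = Dlist E k' i ++ [_] from rfl]
  rw [List.getD_append_right _ _ _ _ (by simp [length_Dlist])]
  rw [length_Dlist]
  simp only [Nat.sub_self, List.getD_cons_zero]
  rw [getD_Dlist E k' i i (le_refl i)]
  congr 3
  rw [winvals]
  apply List.map_congr_left
  intro m hm
  rw [List.mem_range'_1] at hm
  rw [vl, getD_Dlist E k' i (m-1) (by omega)]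

theorem winvals_ne_nil (E : List Int) (k' : Nat) (i : Nat) (hk : 1 ≤ k') :
    winvals E k' i ≠ [] := by
  simp [winvals, List.range'_eq_nil_iff]
  omega


theorem foldl_max_reverse (l : List Int) : ∀ a : Int, l.reverse.foldl max a = l.foldl max a := by
  induction l with
  | nil => intro a; rfl
  | cons x t ih =>
    intro a
    rw [List.reverse_cons, List.foldl_append, ih a, List.foldl_cons, List.foldl_assoc]
    simp [List.foldl_assoc, max_comm]

theorem foldl_max_add (c : Int) : ∀ (t : List Int) (h : Int),
    (List.map (fun x => c + x) t).foldl max (c + h) = c + t.foldl max h := by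
  intro t
  induction t with
  | nil => intro h; rfl
  | cons y t ih =>
    intro h
    simp only [List.map_cons, List.foldl_cons]
    rw [Int.max_add_left, ih]

theorem foldl_max_map_add (c a h : Int) (t : List Int) :
    (List.map (fun x => c + x) (h :: t)).foldl max a = max a (c + t.foldl max h) := by
  simp only [List.map_cons, List.foldl_cons]
  rw [List.foldl_assoc, foldl_max_add]

theorem wm_cons (h y : Int) (t : List Int) : wm (h :: y :: t) = max h (wm (y :: t)) := by
  simp only [wm, List.foldl_cons]
  exact List.foldl_assoc

theorem wm_append_singleton (x h : Int) (t : List Int) :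
    wm ((h :: t) ++ [x]) = max (wm (h :: t)) x := by
  simp [wm, List.foldl_append]

theorem wm_reverse : ∀ l : List Int, wm l.reverse = wm l := by
  intro l
  induction l with
  | nil => rfl
  | cons h t ih =>
    match t with
    | [] => rfl
    | y :: t' =>
      obtain ⟨z, r, hz⟩ := List.exists_cons_of_ne_nil (l := (y :: t').reverse) (by simp)
      rw [List.reverse_cons, hz, wm_append_singleton, ← hz, ih, wm_cons, max_comm]

def wfS : List (Int × Int) → Prop
  | [] => True
  | (v, m) :: s => m = (s.map Prod.fst).foldl max v ∧ wfS s

theorem wfS_push (s : List (Int × Int)) (v : Int) (h : wfS s) :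
    wfS (pvPush s v) ∧ (pvPush s v).map Prod.fst = v :: s.map Prod.fst := by
  match s with
  | [] => exact ⟨⟨rfl, trivial⟩, rfl⟩
  | (w, m) :: s' =>
    obtain ⟨hm, hs'⟩ := h
    refine ⟨⟨?_, hm, hs'⟩, rfl⟩
    simp only [List.map_cons, List.foldl_cons]
    rw [hm]
    exact List.foldl_assoc.symm

theorem wfS_tail (s : List (Int × Int)) (h : wfS s) : wfS s.tail := by
  match s with
  | [] => trivial
  | (v, m) :: s' => exact h.2

theorem wfS_flush (b : List (Int × Int)) : ∀ f, wfS f → wfS (pvFlush b f) ∧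
    (pvFlush b f).map Prod.fst = (b.map Prod.fst).reverse ++ f.map Prod.fst := by
  induction b with
  | nil => intro f hf; simpa [pvFlush] using hf
  | cons p rest ih =>
    intro f hf
    obtain ⟨v, m⟩ := p
    obtain ⟨h1, h2⟩ := wfS_push f v hf
    obtain ⟨h3, h4⟩ := ih (pvPush f v) h1
    refine ⟨h3, ?_⟩
    rw [show pvFlush ((v,m)::rest) f = pvFlush rest (pvPush f v) from rfl, h4, h2]
    simp

theorem pvQMax_spec (f b : List (Int × Int)) (hf : wfS f) (hb : wfS b)
    (h : Int) (t' : List Int) (hq : f.map Prod.fst ++ (b.map Prod.fst).reverse = h :: t') :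
    pvQMax f b = wm (h :: t') := by
  rw [← hq]
  match f, b with
  | [], [] => simp at hq
  | (v, mf) :: f', [] =>
    simpa [pvQMax, wm] using hf.1
  | [], (w, mb) :: b' =>
    have h2 : mb = wm (w :: b'.map Prod.fst) := hb.1
    simp only [List.map_cons, List.map_nil, List.nil_append, pvQMax]
    rw [wm_reverse]
    exact h2
  | (v, mf) :: f', (w, mb) :: b' =>
    have h1 : mf = (f'.map Prod.fst).foldl max v := hf.1
    have h2 : mb = (b'.map Prod.fst).foldl max w := hb.1
    simp only [pvQMax, List.map_cons, List.cons_append, wm]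
    rw [List.foldl_append, ← h1, foldl_max_reverse, List.foldl_cons, List.foldl_assoc, ← h2]

theorem prefix_inv (E : List Int) :
    ∀ i ≤ E.length,
      (List.range i).foldl (fun P i => P.set (i + 1) (P.getD i 0 + E.getD i 0))
          (List.replicate (E.length + 1) 0)
        = (List.range (E.length + 1)).map (fun j => if j ≤ i then ePr E j else 0) := by
  intro i
  induction i with
  | zero =>
    intro _
    apply List.ext_getElem (by simp)
    intro j h1 h2
    simp only [List.getElem_replicate, List.getElem_map, List.getElem_range]
    rw [List.length_map, List.length_range] at h2
    rcases Nat.eq_zero_or_pos j with rfl | hj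
    · simp [ePr]
    · simp [Nat.le_zero, Nat.pos_iff_ne_zero.mp hj]
  | succ i ih =>
    intro hi
    rw [List.range_succ, List.foldl_append, ih (by omega), List.foldl_cons, List.foldl_nil]
    have hg : ((List.range (E.length + 1)).map (fun j => if j ≤ i then ePr E j else 0)).getD i 0
        = ePr E i := by
      rw [List.getD_eq_getElem?_getD, List.getElem?_map]
      simp [List.getElem?_range, Nat.lt_succ_of_le (by omega : i ≤ E.length)]
    rw [hg]
    apply List.ext_getElem (by simp)
    intro j h1 h2
    simp only [List.getElem_set, List.getElem_map, List.getElem_range]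
    rw [List.length_map, List.length_range] at h2
    rcases eq_or_ne (i + 1) j with rfl | hne
    · simp [ePr]
    · simp only [hne, if_false]
      rcases le_or_gt j i with h | h
      · simp [h, Nat.le_succ_of_le h]
      · have h1' : ¬ j ≤ i := by omega
        have h2' : ¬ j ≤ i + 1 := by omega
        simp [h1', h2']

theorem prefix_spec (E : List Int) : ∀ j ≤ E.length, (pvPrefix E).getD j 0 = ePr E j := by
  intro j hj
  rw [pvPrefix, prefix_inv E E.length (le_refl _)]
  rw [List.getD_eq_getElem?_getD, List.getElem?_map]
  simp [List.getElem?_range, Nat.lt_succ_of_le hj, hj]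

def qlist (E : List Int) (k' : Nat) : Nat → List Int
  | 0 => []
  | j + 1 => winvals E k' j

def InvB (E : List Int) (k' : Nat) (i : Nat)
    (st : List (Int × Int) × List (Int × Int) × Int × Int) : Prop :=
  st.2.2.1 = Dv E k' i ∧ st.2.2.2 = Dv E k' (i - 1) ∧ wfS st.1 ∧ wfS st.2.1 ∧
    st.2.1.map Prod.fst ++ (st.1.map Prod.fst).reverse = qlist E k' i

theorem qlist_push_pop (E : List Int) (k' i : Nat) (hk1 : 1 ≤ k') (hki : k' ≤ i) :
    qlist E k' i ++ [vl E k' i] = vl E k' (i - k') :: winvals E k' i := by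
  obtain ⟨j, rfl⟩ : ∃ j, i = j + 1 := ⟨i - 1, by omega⟩
  show winvals E k' j ++ [vl E k' (j + 1)] = _
  rw [winvals, winvals,
    show min k' (j + 1) = k' from by omega,
    show min k' (j + 1 + 1) = k' from by omega,
    show j + 1 + 1 - k' = (j + 1 - k') + 1 from by omega]
  rw [show ([vl E k' (j + 1)] : List Int) = List.map (vl E k') [j + 1] from rfl,
    ← List.map_append]
  have h1 : List.range' (j + 1 - k') k' ++ [j + 1] = List.range' (j + 1 - k') (k' + 1) := by
    rw [List.range'_1_concat, show j + 1 - k' + k' = j + 1 from by omega]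
  rw [h1, List.range'_succ, List.map_cons]

theorem qlist_push_nopop (E : List Int) (k' i : Nat) (hk1 : 1 ≤ k') (hki : i < k') :
    qlist E k' i ++ [vl E k' i] = winvals E k' i := by
  cases i with
  | zero =>
    show [vl E k' 0] = winvals E k' 0
    rw [winvals, show 0 + 1 - k' = 0 from by omega, show min k' (0 + 1) = 1 from by omega]
    rfl
  | succ j =>
    show winvals E k' j ++ [vl E k' (j + 1)] = winvals E k' (j + 1)
    rw [winvals, winvals,
      show j + 1 - k' = 0 from by omega,
      show j + 1 + 1 - k' = 0 from by omega,
      show min k' (j + 1) = j + 1 from by omega,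
      show min k' (j + 1 + 1) = j + 1 + 1 from by omega]
    rw [show ([vl E k' (j + 1)] : List Int) = List.map (vl E k') [j + 1] from rfl,
      ← List.map_append]
    have h1 : List.range' 0 (j + 1 + 1) = List.range' 0 (j + 1) ++ [j + 1] := by
      rw [List.range'_1_concat, Nat.zero_add]
    rw [h1]

theorem stepB (E : List Int) (k : Int) (k' : Nat)
    (hk : k = (k' : Int)) (hk1 : 1 ≤ k') (i : Nat) (hi : i < E.length) (st)
    (h : InvB E k' i st) : InvB E k' (i + 1) (pvStep (pvPrefix E) k st i) := by
  obtain ⟨b, f, prev, prev2⟩ := st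
  obtain ⟨hprev, hprev2, hwb, hwf, hq⟩ := h
  simp only at hprev hprev2 hwb hwf hq
  have hPi : (pvPrefix E).getD i 0 = ePr E i := prefix_spec E i (by omega)
  have hPi1 : (pvPrefix E).getD (i + 1) 0 = ePr E (i + 1) := prefix_spec E (i + 1) (by omega)
  have hv : prev2 - (pvPrefix E).getD i 0 = vl E k' i := by
    rw [hPi, hprev2, vl]
  obtain ⟨hwb1, hvb1⟩ := wfS_push b (prev2 - (pvPrefix E).getD i 0) hwb
  set v := prev2 - (pvPrefix E).getD i 0 with hvdef
  -- the queue after the push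
  have hq1 : f.map Prod.fst ++ ((pvPush b v).map Prod.fst).reverse
      = qlist E k' i ++ [vl E k' i] := by
    rw [hvb1, List.reverse_cons, ← List.append_assoc, hq, hv]
  rw [pvStep]
  simp only
  rw [← hvdef]
  rcases le_or_gt (k' : Int) i with hpop | hnopop
  · -- pop branch
    have hki : k' ≤ i := by exact_mod_cast hpop
    have hcond : ((i : Int) - k ≥ 0) := by omega
    rw [if_pos hcond]
    have hq2 : qlist E k' i ++ [vl E k' i] = vl E k' (i - k') :: winvals E k' i :=
      qlist_push_pop E k' i hk1 hki
    rcases eq_or_ne f ([] : List (Int × Int)) with rfl | hfne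
    · rw [if_pos rfl]
      obtain ⟨hwf2, hvf2⟩ := wfS_flush (pvPush b v) [] trivial
      have hvf2' : (pvFlush (pvPush b v) []).map Prod.fst
          = vl E k' (i - k') :: winvals E k' i := by
        rw [hvf2, List.map_nil, List.append_nil, ← hq2, ← hq1]
        simp
      refine ⟨?_, by simpa using hprev, trivial, wfS_tail _ hwf2, ?_⟩
      · -- cur = Dv (i+1)
        simp only
        obtain ⟨wh, wt, hwin⟩ := List.exists_cons_of_ne_nil (winvals_ne_nil E k' i hk1)
        rw [pvQMax_spec _ [] (wfS_tail _ hwf2) (show wfS [] from trivial) wh wt ?_]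
        · rw [hPi1, hprev, ← hwin, ← Dv_succ]
        · rw [List.map_tail, hvf2', List.tail_cons, hwin]
          simp
      · simp only [List.map_nil, List.reverse_nil, List.append_nil, List.map_tail, hvf2',
          List.tail_cons]
        rfl
    · rw [if_neg hfne]
      obtain ⟨p, f', rfl⟩ := List.exists_cons_of_ne_nil hfne
      have hsplit : p.1 = vl E k' (i - k') ∧
          f'.map Prod.fst ++ ((pvPush b v).map Prod.fst).reverse = winvals E k' i := by
        have := hq1.trans hq2
        rw [List.map_cons, List.cons_append] at this
        exact ⟨by injection this, by injection this⟩
      refine ⟨?_, by simpa using hprev, hwb1, wfS_tail _ hwf, ?_⟩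
      · simp only
        obtain ⟨wh, wt, hwin⟩ := List.exists_cons_of_ne_nil (winvals_ne_nil E k' i hk1)
        rw [pvQMax_spec _ _ (wfS_tail _ hwf) hwb1 wh wt (by rw [List.tail_cons, hsplit.2, hwin])]
        rw [hPi1, hprev, ← hwin, ← Dv_succ]
      · simpa using hsplit.2
  · -- no pop
    have hki : i < k' := by exact_mod_cast hnopop
    have hcond : ¬ ((i : Int) - k ≥ 0) := by omega
    rw [if_neg hcond]
    have hq2 : f.map Prod.fst ++ ((pvPush b v).map Prod.fst).reverse = winvals E k' i :=
      hq1.trans (qlist_push_nopop E k' i hk1 hki)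
    refine ⟨?_, by simpa using hprev, hwb1, hwf, hq2⟩
    simp only
    obtain ⟨wh, wt, hwin⟩ := List.exists_cons_of_ne_nil (winvals_ne_nil E k' i hk1)
    rw [pvQMax_spec _ _ hwf hwb1 wh wt (by rw [hq2, hwin])]
    rw [hPi1, hprev, ← hwin, ← Dv_succ]

theorem foldB (E : List Int) (k : Int) (k' : Nat)
    (hk : k = (k' : Int)) (hk1 : 1 ≤ k') :
    ∀ i ≤ E.length, InvB E k' i ((List.range i).foldl (pvStep (pvPrefix E) k) ([], [], 0, 0)) := by
  intro i
  induction i with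
  | zero => intro _; exact ⟨rfl, rfl, trivial, trivial, rfl⟩
  | succ i ih =>
    intro hi
    rw [List.range_succ, List.foldl_append, List.foldl_cons, List.foldl_nil]
    exact stepB E k k' hk hk1 i (by omega) _ (ih (by omega))

-- ===== put together =====

theorem innerA_spec (E dp : List Int) (i : Nat) (k : Int) (k' : Nat)
    (hk : k = (k' : Int))
    (hdp : ∀ j, dp.getD j 0 = if j < i then Dv E k' (j + 1) else 0) :
    ∀ d0 : Nat, 1 ≤ d0 → d0 ≤ i + 2 → ∀ mv : Int,
      (innerA E dp i k (d0 : Int) mv (ePr E (i + 1) - ePr E (i + 2 - d0))).1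
      = List.foldl max mv
          (((List.range' (i + 1 - min k' (i + 1)) (min k' (i + 1) + 1 - d0)).map
            (fun m => ePr E (i + 1) + vl E k' m)).reverse) := by
  suffices H : ∀ fuel d0, k' + 1 - d0 = fuel → 1 ≤ d0 → d0 ≤ i + 2 → ∀ mv : Int,
      (innerA E dp i k (d0 : Int) mv (ePr E (i + 1) - ePr E (i + 2 - d0))).1
      = List.foldl max mv
          (((List.range' (i + 1 - min k' (i + 1)) (min k' (i + 1) + 1 - d0)).map
            (fun m => ePr E (i + 1) + vl E k' m)).reverse) by
    intro d0; exact H (k' + 1 - d0) d0 rfl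
  intro fuel
  induction fuel with
  | zero =>
    intro d0 hfuel h1 h2 mv
    have hlen : min k' (i + 1) + 1 - d0 = 0 := by omega
    rw [hlen, innerA, dif_neg (by rw [hk]; omega)]
    simp
  | succ fuel ih =>
    intro d0 hfuel h1 h2 mv
    have hd0k : d0 ≤ k' := by omega
    rw [innerA, dif_pos (by rw [hk]; omega)]
    rcases Nat.lt_or_ge (i + 1) d0 with hbr | hle
    · -- break: d0 = i + 2
      have hd0 : d0 = i + 2 := by omega
      have hcond : (i : Int) - (d0 : Int) + 1 < 0 := by omega
      have hlen : min k' (i + 1) + 1 - d0 = 0 := by omega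
      rw [hlen, if_pos hcond]
      simp
    · -- process m = i + 1 - d0
      have hcond : ¬ ((i : Int) - (d0 : Int) + 1 < 0) := by omega
      set m : Nat := i + 1 - d0 with hm
      have hmi : ((i : Int) - (d0 : Int) + 1) = (m : Int) := by omega
      have htn : ((i : Int) - (d0 : Int) + 1).toNat = m := by omega
      have hprev : (if (i : Int) - (d0 : Int) - 1 ≥ 0 then
          dp.getD ((i : Int) - (d0 : Int) - 1).toNat 0 else 0) = Dv E k' (m - 1) := by
        rcases Nat.lt_or_ge (d0 + 1) i with h | h
        · rw [if_pos (by omega)]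
          have : ((i : Int) - (d0 : Int) - 1).toNat = i - d0 - 1 := by omega
          rw [this, hdp]
          have : i - d0 - 1 < i := by omega
          rw [if_pos this]
          congr 1
          omega
        · -- d0 ∈ {i-1, i, i+1}: careful, only d0 ≥ i makes the condition false
          rcases lt_or_ge ((i : Int) - (d0 : Int) - 1) 0 with hneg | hpos
          · rw [if_neg (by omega)]
            have hm1 : m - 1 = 0 := by omega
            rw [hm1]; rfl
          · rw [if_pos (by omega)]
            have : ((i : Int) - (d0 : Int) - 1).toNat = i - d0 - 1 := by omega
            rw [this, hdp, if_pos (by omega)]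
            congr 1
            omega
      have htot : ePr E (i + 1) - ePr E (i + 2 - d0) + E.getD ((i : Int) - (d0 : Int) + 1).toNat 0
          = ePr E (i + 1) - ePr E m := by
        rw [htn]
        have : i + 2 - d0 = m + 1 := by omega
        rw [this, show ePr E (m + 1) = ePr E m + E.getD m 0 from rfl]
        omega
      rw [if_neg hcond]
      simp only
      rw [htot, hprev]
      have := ih (d0 + 1) (by omega) (by omega) (by omega)
        (max mv (ePr E (i + 1) - ePr E m + Dv E k' (m - 1)))
      rw [Nat.cast_add, Nat.cast_one,
        show i + 2 - (d0 + 1) = m from by omega,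
        show min k' (i + 1) + 1 - (d0 + 1) = min k' (i + 1) - d0 from by omega] at this
      rw [this]
      -- now the two folds agree
      have hmn : min k' (i + 1) + 1 - d0 = (min k' (i + 1) - d0) + 1 := by omega
      rw [hmn, List.range'_1_concat]
      have hlast : i + 1 - min k' (i + 1) + (min k' (i + 1) - d0) = m := by omega
      rw [hlast]
      rw [List.map_append, List.reverse_append]
      simp only [List.map_cons, List.map_nil, List.reverse_cons, List.reverse_nil,
        List.nil_append, List.cons_append, List.foldl_cons]
      congr 1
      rw [vl]
      omega

theorem foldl_max_map_add' (c a : Int) (l : List Int) (hl : l ≠ []) :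
    (List.map (fun x => c + x) l).foldl max a = max a (c + wm l) := by
  obtain ⟨h, t, rfl⟩ := List.exists_cons_of_ne_nil hl
  rw [foldl_max_map_add]
  rfl

theorem dpA_spec (E : List Int) (k : Int) (k' : Nat)
    (hk : k = (k' : Int)) (hk1 : 1 ≤ k') (n : Nat) (hn : n = E.length) :
    ∀ i ≤ n,
      (List.range i).foldl (fun dp i =>
        let mv := if 0 < i then dp.getD (i - 1) 0 else 0
        let r := innerA E dp i k 1 mv 0
        dp.set i r.1) (List.replicate n 0)
      = (List.range n).map (fun j => if j < i then Dv E k' (j + 1) else 0) := by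
  intro i
  induction i with
  | zero =>
    intro _
    apply List.ext_getElem (by simp)
    intro j h1 h2
    simp
  | succ i ih =>
    intro hi
    rw [List.range_succ, List.foldl_append, ih (by omega), List.foldl_cons, List.foldl_nil]
    set dp := (List.range n).map (fun j => if j < i then Dv E k' (j + 1) else 0) with hdpdef
    have hdp : ∀ j, dp.getD j 0 = if j < i then Dv E k' (j + 1) else 0 := by
      intro j
      rcases Nat.lt_or_ge j n with h | h
      · rw [hdpdef, List.getD_eq_getElem?_getD, List.getElem?_map]
        simp [h]
      · have h1 : ¬ j < i := by omega
        rw [hdpdef, List.getD_eq_getElem?_getD, List.getElem?_map]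
        simp [Nat.not_lt.mpr h, h1]
    have hmv : (if 0 < i then dp.getD (i - 1) 0 else 0) = Dv E k' i := by
      rcases Nat.eq_zero_or_pos i with rfl | hpos
      · rfl
      · rw [if_pos hpos, hdp, if_pos (by omega)]
        congr 1
        omega
    simp only [hmv]
    have hcall := innerA_spec E dp i k k' hk hdp 1 (le_refl 1) (by omega) (Dv E k' i)
    rw [show i + 2 - 1 = i + 1 from by omega, sub_self] at hcall
    push_cast at hcall
    rw [hcall, foldl_max_reverse]
    have hmm : (List.range' (i + 1 - min k' (i + 1)) (min k' (i + 1))).map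
          (fun m => ePr E (i + 1) + vl E k' m)
        = (winvals E k' i).map (fun x => ePr E (i + 1) + x) := by
      rw [show i + 1 - min k' (i + 1) = i + 1 - k' from by omega, winvals, List.map_map]
      rfl
    rw [hmm, foldl_max_map_add' _ _ _ (winvals_ne_nil E k' i hk1), ← Dv_succ]
    apply List.ext_getElem (by simp [hdpdef])
    intro j h1 h2
    rw [List.length_map, List.length_range] at h2
    rw [List.getElem_set]
    simp only [hdpdef, List.getElem_map, List.getElem_range]
    rcases eq_or_ne i j with rfl | hne
    · simp
    · simp only [hne, if_false]
      rcases Nat.lt_or_ge j i with h | h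
      · simp [h, Nat.lt_succ_of_lt h]
      · have c1 : ¬ j < i := by omega
        have c2 : ¬ j < i + 1 := by omega
        simp [c1, c2]

theorem A_eq_Dv (E : List Int) (k : Int) (k' : Nat)
    (hk : k = (k' : Int)) (hk1 : 1 ≤ k') (hn : E ≠ []) :
    max_earnings E k = Dv E k' E.length := by
  have hlen : E.length ≠ 0 := by simpa using hn
  rw [max_earnings]
  simp only [if_neg hlen]
  rw [dpA_spec E k k' hk hk1 E.length rfl E.length (le_refl _)]
  have hne : (List.range E.length).map
      (fun j => if j < E.length then Dv E k' (j + 1) else 0) ≠ [] := by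
    simp [hlen]
  rw [PySem.List.pyGetD_neg_one _ _ hne, List.getLast_eq_getElem]
  simp only [List.length_map, List.length_range, List.getElem_map, List.getElem_range]
  rw [if_pos (by omega), Nat.sub_add_cancel (by omega)]

theorem B_eq_Dv (E : List Int) (k : Int) (k' : Nat)
    (hk : k = (k' : Int)) (hk1 : 1 ≤ k') (hn : E ≠ []) :
    max_earnings_alt E k = Dv E k' E.length := by
  rw [max_earnings_alt]
  simp only
  rw [if_neg (by push Not; exact ⟨by simpa using hn, by omega⟩)]
  exact (foldB E k k' hk hk1 E.length (le_refl _)).1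

theorem replicate_getD (n j : Nat) : (List.replicate n (0 : Int)).getD j 0 = 0 := by
  rw [List.getD_eq_getElem?_getD, List.getElem?_replicate]
  split_ifs <;> rfl

theorem A_zero (E : List Int) (k : Int) (hk : k ≤ 0) : max_earnings E k = 0 := by
  rw [max_earnings]
  rcases eq_or_ne E.length 0 with h0 | h0
  · simp [h0]
  · simp only [if_neg h0]
    have hfold : ∀ i, (List.range i).foldl (fun dp i =>
        let mv := if 0 < i then dp.getD (i - 1) 0 else 0
        let r := innerA E dp i k 1 mv 0
        dp.set i r.1) (List.replicate E.length 0) = List.replicate E.length 0 := by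
      intro i
      induction i with
      | zero => rfl
      | succ i ih =>
        rw [List.range_succ, List.foldl_append, ih, List.foldl_cons, List.foldl_nil]
        simp only
        rw [innerA, dif_neg (by omega)]
        simp only [replicate_getD, ite_self]
        rw [List.set_replicate_self]
    rw [hfold]
    rw [PySem.List.pyGetD_neg_one _ _ (by simpa using h0)]
    exact List.getLast_replicate _

-- ===== VERDICT (by name: the statement is the Claim_ definition above) =====
theorem max_earnings_spec : Claim_equal_max_earnings := by
  intro E k _
  unfold Spec_max_earnings
  rcases eq_or_ne E [] with hE | hE
  · subst hE; rfl
  · rcases le_or_gt k 0 with hk | hk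
    · rw [A_zero E k hk]
      simp [max_earnings_alt, hk]
    · have hk' : k = (k.toNat : Int) := by omega
      have hk1 : 1 ≤ k.toNat := by omega
      rw [A_eq_Dv E k k.toNat hk' hk1 hE, B_eq_Dv E k k.toNat hk' hk1 hE]
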